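-- pv_equiv track=rewrite | github.com/TreeWonTwoToFor/personal_projects | Python/Needs_Work/TreeOS/v4/Engine/Object.py | get_bounding_box_values
-- ===== SOURCE A (Python) =====
-- def get_bounding_box_values(model):
--     max_x, max_y, max_z = model[0][0][0][0], model[0][0][0][1], model[0][0][0][2]
--     low_x, low_y, low_z = model[0][0][0][0], model[0][0][0][1], model[0][0][0][2]
--     for point_pair in model:
--         for point in point_pair[0]:
--             if point[0] > max_x: max_x = point[0]
--             if point[0] < low_x: low_x = point[0]
--             if point[1] > max_y: max_y = point[1]
--             if point[1] < low_y: low_y = point[1]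
--             if point[2] > max_z: max_z = point[2]
--             if point[2] < low_z: low_z = point[2]
--     return (low_x, low_y,low_z, max_x, max_y, max_z)
-- ===== SOURCE B (Python) =====
-- def get_bounding_box_values(model):
--     pts = [p for pair in model for p in pair[0]]
--     return (min(p[0] for p in pts),
--             min(p[1] for p in pts),
--             min(p[2] for p in pts),
--             max(p[0] for p in pts),
--             max(p[1] for p in pts),
--             max(p[2] for p in pts))
-- ===== Notes on version B (the rewrite author's own statement) =====
-- stated objective: simpler
-- what changed: Replaces the fused six-accumulator nested loop with materializing all points via a comprehension and six independent min/max scans.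
import Mathlib
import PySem

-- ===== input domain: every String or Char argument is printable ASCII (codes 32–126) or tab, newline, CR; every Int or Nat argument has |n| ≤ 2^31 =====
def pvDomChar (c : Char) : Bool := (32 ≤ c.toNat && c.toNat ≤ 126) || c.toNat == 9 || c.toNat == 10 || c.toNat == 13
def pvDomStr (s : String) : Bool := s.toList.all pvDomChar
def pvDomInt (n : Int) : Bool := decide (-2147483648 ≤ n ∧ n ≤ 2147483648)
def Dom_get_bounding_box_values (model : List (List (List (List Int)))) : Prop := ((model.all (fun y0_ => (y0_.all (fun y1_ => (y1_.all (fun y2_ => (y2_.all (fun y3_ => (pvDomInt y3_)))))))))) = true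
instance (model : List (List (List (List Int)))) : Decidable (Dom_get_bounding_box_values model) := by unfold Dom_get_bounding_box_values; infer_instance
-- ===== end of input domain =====

-- B rebuilds A's fused six-accumulator loop as one comprehension plus six independent min/max scans (simpler decomposition, same cost).

-- ===== PORT A =====
-- the loop body: the six independent if-updates on (low_x, low_y, low_z, max_x, max_y, max_z).
-- List.getD is exact here: Pre_ guarantees every accessed index is in range (Python would raise otherwise).
def bbStep (st : Int × Int × Int × Int × Int × Int) (point : List Int) : Int × Int × Int × Int × Int × Int :=
  match st with
  | (lx, ly, lz, mx, my, mz) =>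
    let mx := if point.getD 0 0 > mx then point.getD 0 0 else mx
    let lx := if point.getD 0 0 < lx then point.getD 0 0 else lx
    let my := if point.getD 1 0 > my then point.getD 1 0 else my
    let ly := if point.getD 1 0 < ly then point.getD 1 0 else ly
    let mz := if point.getD 2 0 > mz then point.getD 2 0 else mz
    let lz := if point.getD 2 0 < lz then point.getD 2 0 else lz
    (lx, ly, lz, mx, my, mz)

def get_bounding_box_values (model : List (List (List (List Int)))) : Int × Int × Int × Int × Int × Int :=
  let p0 := ((model.headD []).headD []).headD []      -- model[0][0][0] (in range under Pre_)
  let x0 := p0.getD 0 0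
  let y0 := p0.getD 1 0
  let z0 := p0.getD 2 0
  model.foldl (fun st point_pair => (point_pair.headD []).foldl bbStep st) (x0, y0, z0, x0, y0, z0)

-- ===== PORT B =====
def get_bounding_box_values_alt (model : List (List (List (List Int)))) : Int × Int × Int × Int × Int × Int :=
  let pts := model.flatMap (fun pair => pair.headD [])   -- [p for pair in model for p in pair[0]]
  -- min()/max() of a nonempty iterable; .getD 0 only realised outside Pre_ (Python raises ValueError there)
  ((PySem.List.min? (pts.map (fun p => p.getD 0 0)) (fun y => y)).getD 0,
   (PySem.List.min? (pts.map (fun p => p.getD 1 0)) (fun y => y)).getD 0,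
   (PySem.List.min? (pts.map (fun p => p.getD 2 0)) (fun y => y)).getD 0,
   (PySem.List.max? (pts.map (fun p => p.getD 0 0)) (fun y => y)).getD 0,
   (PySem.List.max? (pts.map (fun p => p.getD 1 0)) (fun y => y)).getD 0,
   (PySem.List.max? (pts.map (fun p => p.getD 2 0)) (fun y => y)).getD 0)

-- ===== PRECONDITION & SPEC =====
-- a point carries x, y and z coordinates (at least three entries)
def pvHasXYZ (p : List Int) : Bool :=
  match p with
  | _ :: _ :: _ :: _ => true
  | _ => false

-- exactly the inputs on which A returns: model nonempty, every pair nonempty, every iterated point carries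
-- x/y/z coordinates, and the first pair's point list is nonempty (for the eager initialization reads).
def Pre_get_bounding_box_values (model : List (List (List (List Int)))) : Prop :=
  model ≠ [] ∧
  (∀ pair ∈ model, pair ≠ [] ∧ ∀ p ∈ pair.headD ([] : List (List Int)), pvHasXYZ p = true) ∧
  (model.headD []).headD [] ≠ []
instance (model : List (List (List (List Int)))) : Decidable (Pre_get_bounding_box_values model) := by unfold Pre_get_bounding_box_values; infer_instance

def pvWitness_get_bounding_box_values : List (List (List (List Int))) := [[[[1, 2, 3], [4, 0, -1]], []], [[[2, 5, 2]]]]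

def Spec_get_bounding_box_values (model : List (List (List (List Int)))) (out : Int × Int × Int × Int × Int × Int) : Prop := out = get_bounding_box_values_alt model
instance (model : List (List (List (List Int)))) (out : Int × Int × Int × Int × Int × Int) : Decidable (Spec_get_bounding_box_values model out) := by unfold Spec_get_bounding_box_values; infer_instance

-- ===== CLAIM (what is proved, stated in full; the proofs are below) =====
def Claim_equal_get_bounding_box_values : Prop := ∀ (model : List (List (List (List Int)))), Dom_get_bounding_box_values model → Pre_get_bounding_box_values model → Spec_get_bounding_box_values model (get_bounding_box_values model)

-- ===== LEMMAS AND PROOFS =====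

-- A's fused fold splits into six componentwise folds.
lemma bb_fused (ps : List (List Int)) (st : Int × Int × Int × Int × Int × Int) :
    ps.foldl bbStep st =
      (ps.foldl (fun a p => if p.getD 0 0 < a then p.getD 0 0 else a) st.1,
       ps.foldl (fun a p => if p.getD 1 0 < a then p.getD 1 0 else a) st.2.1,
       ps.foldl (fun a p => if p.getD 2 0 < a then p.getD 2 0 else a) st.2.2.1,
       ps.foldl (fun a p => if p.getD 0 0 > a then p.getD 0 0 else a) st.2.2.2.1,
       ps.foldl (fun a p => if p.getD 1 0 > a then p.getD 1 0 else a) st.2.2.2.2.1,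
       ps.foldl (fun a p => if p.getD 2 0 > a then p.getD 2 0 else a) st.2.2.2.2.2) := by
  induction ps generalizing st with
  | nil => simp
  | cons p ps ih =>
    obtain ⟨lx, ly, lz, mx, my, mz⟩ := st
    simp only [List.foldl_cons, ih, bbStep]

-- the nested loop over pairs is a single fold over the flattened point list.
lemma bb_nested (model : List (List (List (List Int)))) (st : Int × Int × Int × Int × Int × Int) :
    model.foldl (fun st point_pair => (point_pair.headD []).foldl bbStep st) st =
      (model.flatMap (fun pair => pair.headD [])).foldl bbStep st := by
  induction model generalizing st with
  | nil => simp
  | cons pair rest ih =>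
    simp only [List.foldl_cons, List.flatMap_cons, List.foldl_append]
    exact ih _

lemma if_lt_eq_min : (fun (a : Int) (p : List Int) => if p.getD 0 0 < a then p.getD 0 0 else a) = (fun a p => min a (p.getD 0 0)) := by
  funext a p; rw [min_def]; split <;> split <;> omega

lemma if_lt_eq_min1 : (fun (a : Int) (p : List Int) => if p.getD 1 0 < a then p.getD 1 0 else a) = (fun a p => min a (p.getD 1 0)) := by
  funext a p; rw [min_def]; split <;> split <;> omega

lemma if_lt_eq_min2 : (fun (a : Int) (p : List Int) => if p.getD 2 0 < a then p.getD 2 0 else a) = (fun a p => min a (p.getD 2 0)) := by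
  funext a p; rw [min_def]; split <;> split <;> omega

lemma if_gt_eq_max : (fun (a : Int) (p : List Int) => if p.getD 0 0 > a then p.getD 0 0 else a) = (fun a p => max a (p.getD 0 0)) := by
  funext a p; rw [max_def]; split <;> split <;> omega

lemma if_gt_eq_max1 : (fun (a : Int) (p : List Int) => if p.getD 1 0 > a then p.getD 1 0 else a) = (fun a p => max a (p.getD 1 0)) := by
  funext a p; rw [max_def]; split <;> split <;> omega

lemma if_gt_eq_max2 : (fun (a : Int) (p : List Int) => if p.getD 2 0 > a then p.getD 2 0 else a) = (fun a p => max a (p.getD 2 0)) := by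
  funext a p; rw [max_def]; split <;> split <;> omega

-- ===== VERDICT (by name: the statement is the Claim_ definition above) =====
theorem get_bounding_box_values_spec : Claim_equal_get_bounding_box_values := by
  unfold Claim_equal_get_bounding_box_values
  intro model _ hpre
  obtain ⟨hne, _, hfirst⟩ := hpre
  unfold Spec_get_bounding_box_values get_bounding_box_values get_bounding_box_values_alt
  obtain ⟨pair0, mrest, rfl⟩ : ∃ p r, model = p :: r := by
    cases model with
    | nil => exact absurd rfl hne
    | cons p r => exact ⟨p, r, rfl⟩
  obtain ⟨ptl0, prest, hp0⟩ : ∃ l r, pair0 = l :: r := by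
    cases pair0 with
    | nil => simp at hfirst
    | cons l r => exact ⟨l, r, rfl⟩
  subst hp0
  obtain ⟨q, qrest, hq⟩ : ∃ x xs, ptl0 = x :: xs := by
    cases ptl0 with
    | nil => simp at hfirst
    | cons x xs => exact ⟨x, xs, rfl⟩
  subst hq
  simp only [List.headD_cons, List.flatMap_cons]
  rw [bb_nested, bb_fused]
  simp only [List.cons_append, List.map_cons, PySem.List.min?_id_cons, PySem.List.max?_id_cons,
    Option.getD_some, List.foldl_map]
  rw [if_lt_eq_min, if_lt_eq_min1, if_lt_eq_min2, if_gt_eq_max, if_gt_eq_max1, if_gt_eq_max2]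
  simp
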